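-- pv_equiv track=rewrite | github.com/azulqarni/bandwidth-estimator-rl | util/logflatten.py | find_interval_index0
-- ===== SOURCE A (Python) =====
-- def find_interval_index0(timestamp_dt, intervals):
--     # Intervals are sorted by default
--     # Sort the intervals based on their start times
--     sorted_intervals = intervals # sorted(intervals, key=lambda x: x[0])
--
--     # Binary search to find the interval containing the timestamp
--     low, high = 0, len(sorted_intervals) - 1
--
--     while low <= high:
--         mid = (low + high) // 2
--         interval_start, interval_end = sorted_intervals[mid]
--
--         if interval_start <= timestamp_dt <= interval_end:
--             return mid, True
--         elif timestamp_dt < interval_start: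
--             high = mid - 1
--         else:
--             low = mid + 1
--
--     return low, False
-- ===== SOURCE B (Python) =====
-- def find_interval_index0(timestamp_dt, intervals):
--     # Divide-and-conquer on list slices carrying an offset, instead of low/high index bookkeeping.
--     def go(seg, offset):
--         if not seg:
--             return offset, False
--         m = (len(seg) - 1) // 2
--         interval_start, interval_end = seg[m]
--         if interval_start <= timestamp_dt <= interval_end:
--             return offset + m, True
--         if timestamp_dt < interval_start:
--             return go(seg[:m], offset)
--         return go(seg[m + 1:], offset + m + 1)
--     return go(intervals, 0)
-- ===== Notes on version B (the rewrite author's own statement) =====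
-- stated objective: alternative
-- what changed: Replaces the iterative low/high-index binary-search loop by a divide-and-conquer recursion on list slices carrying an offset; same probe sequence and identical return values, including the insertion point on failure.
import Mathlib
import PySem

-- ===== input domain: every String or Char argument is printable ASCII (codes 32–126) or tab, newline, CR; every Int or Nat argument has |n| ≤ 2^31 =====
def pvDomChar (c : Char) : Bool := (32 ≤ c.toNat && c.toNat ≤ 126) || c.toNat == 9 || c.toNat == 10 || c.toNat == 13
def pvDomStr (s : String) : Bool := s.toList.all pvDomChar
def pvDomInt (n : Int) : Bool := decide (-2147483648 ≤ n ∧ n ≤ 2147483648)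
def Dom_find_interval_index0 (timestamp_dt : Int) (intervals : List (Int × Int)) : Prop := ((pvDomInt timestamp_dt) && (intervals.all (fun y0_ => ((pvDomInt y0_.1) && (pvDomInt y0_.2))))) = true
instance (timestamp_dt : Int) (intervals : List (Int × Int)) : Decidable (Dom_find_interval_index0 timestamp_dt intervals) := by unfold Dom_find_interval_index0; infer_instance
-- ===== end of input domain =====

-- B re-decomposes A's low/high binary-search loop as divide-and-conquer recursion on list
-- slices with an offset (objective: alternative structure; same probe sequence and values).

-- ===== PORT A =====
-- A's while loop over (low, high); intervals[mid] is always in range on every reachable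
-- state (0 ≤ low ≤ mid ≤ high ≤ len-1), so pyGetD's default is dead code.
def find_interval_index0_loop (timestamp_dt : Int) (xs : List (Int × Int)) (low high : Int) : Int × Bool :=
  if _h : low ≤ high then
    let mid := PySem.Int.floordiv (low + high) 2
    let p := PySem.List.pyGetD xs mid (0, 0)
    if p.1 ≤ timestamp_dt ∧ timestamp_dt ≤ p.2 then (mid, true)
    else if timestamp_dt < p.1 then find_interval_index0_loop timestamp_dt xs low (mid - 1)
    else find_interval_index0_loop timestamp_dt xs (mid + 1) high
  else (low, false)
termination_by (high + 1 - low).toNat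
decreasing_by
  · have := PySem.Int.floordiv_two_mid_bounds _h; omega
  · have := PySem.Int.floordiv_two_mid_bounds _h; omega

def find_interval_index0 (timestamp_dt : Int) (intervals : List (Int × Int)) : Int × Bool :=
  find_interval_index0_loop timestamp_dt intervals 0 ((intervals.length : Int) - 1)

-- ===== PORT B =====
-- B's helper go(seg, offset): recursion on the middle-split slices of the list.
def find_interval_index0_go (timestamp_dt : Int) (seg : List (Int × Int)) (offset : Int) : Int × Bool :=
  if hseg : seg = [] then (offset, false)
  else
    let m := (seg.length - 1) / 2
    let p := seg.getD m (0, 0)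
    if p.1 ≤ timestamp_dt ∧ timestamp_dt ≤ p.2 then (offset + (m : Int), true)
    else if timestamp_dt < p.1 then find_interval_index0_go timestamp_dt (seg.take m) offset
    else find_interval_index0_go timestamp_dt (seg.drop (m + 1)) (offset + (m : Int) + 1)
termination_by seg.length
decreasing_by
  · have : seg.length ≠ 0 := fun h => hseg (List.eq_nil_of_length_eq_zero h)
    simp [List.length_take]; omega
  · have : seg.length ≠ 0 := fun h => hseg (List.eq_nil_of_length_eq_zero h)
    simp [List.length_drop]; omega

def find_interval_index0_alt (timestamp_dt : Int) (intervals : List (Int × Int)) : Int × Bool :=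
  find_interval_index0_go timestamp_dt intervals 0

-- ===== PRECONDITION & SPEC =====
def Spec_find_interval_index0 (timestamp_dt : Int) (intervals : List (Int × Int)) (out : Int × Bool) : Prop := out = find_interval_index0_alt timestamp_dt intervals
instance (timestamp_dt : Int) (intervals : List (Int × Int)) (out : Int × Bool) : Decidable (Spec_find_interval_index0 timestamp_dt intervals out) := by unfold Spec_find_interval_index0; infer_instance

-- ===== CLAIM (what is proved, stated in full; the proofs are below) =====
def Claim_equal_find_interval_index0 : Prop := ∀ (timestamp_dt : Int) (intervals : List (Int × Int)), Dom_find_interval_index0 timestamp_dt intervals → Spec_find_interval_index0 timestamp_dt intervals (find_interval_index0 timestamp_dt intervals)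

-- ===== LEMMAS AND PROOFS =====

-- Loop/recursion correspondence: A's loop on (low, high) equals B's go on the slice
-- xs[low .. high] with offset low, whenever 0 ≤ low and high ≤ len - 1.
theorem loop_eq_go (t : Int) (xs : List (Int × Int)) :
    ∀ (n : Nat) (low high : Int), (high + 1 - low).toNat ≤ n → 0 ≤ low →
      high ≤ (xs.length : Int) - 1 →
      find_interval_index0_loop t xs low high =
        find_interval_index0_go t ((xs.drop low.toNat).take (high + 1 - low).toNat) low := by
  intro n
  induction n with
  | zero =>
    intro low high hn hlo hhi
    have hlh : ¬ low ≤ high := by omega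
    rw [find_interval_index0_loop, find_interval_index0_go]
    have : (high + 1 - low).toNat = 0 := by omega
    simp [hlh, this]
  | succ n ih =>
    intro low high hn hlo hhi
    by_cases hlh : low ≤ high
    · have hfd : PySem.Int.floordiv (low + high) 2 = (low + high) / 2 :=
        PySem.Int.floordiv_eq_ediv_of_pos (by norm_num)
      have hn' : high - low ≤ (n : Int) := by omega
      have hmidb : low ≤ (low + high) / 2 ∧ (low + high) / 2 ≤ high := by omega
      rw [find_interval_index0_loop, find_interval_index0_go]
      have hlen : ((xs.drop low.toNat).take (high + 1 - low).toNat).length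
          = (high + 1 - low).toNat := by
        simp [List.length_take, List.length_drop]; omega
      have hne : (xs.drop low.toNat).take (high + 1 - low).toNat ≠ [] := by
        intro h; rw [h] at hlen; simp at hlen; omega
      have hm : (((xs.drop low.toNat).take (high + 1 - low).toNat).length - 1) / 2
          = ((low + high) / 2 - low).toNat := by rw [hlen]; omega
      have hget : ((xs.drop low.toNat).take (high + 1 - low).toNat).getD
            (((low + high) / 2 - low).toNat) (0, 0)
          = PySem.List.pyGetD xs ((low + high) / 2) (0, 0) := by
        have hmn : ((low + high) / 2 - low).toNat
            < ((xs.drop low.toNat).take (high + 1 - low).toNat).length := by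
          rw [hlen]; omega
        rw [List.getD_eq_getElem _ _ hmn,
            PySem.List.pyGetD_of_nonneg xs (0, 0) (by omega),
            List.getD_eq_getElem _ _ (by omega)]
        rw [List.getElem_take, List.getElem_drop]
        congr 1; omega
      simp only [dif_pos hlh, dif_neg hne, hfd, hm, hget]
      by_cases hin : (PySem.List.pyGetD xs ((low + high) / 2) (0, 0)).1 ≤ t ∧
          t ≤ (PySem.List.pyGetD xs ((low + high) / 2) (0, 0)).2
      · simp only [if_pos hin]
        congr 1; omega
      · simp only [if_neg hin]
        by_cases hlt : t < (PySem.List.pyGetD xs ((low + high) / 2) (0, 0)).1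
        · simp only [if_pos hlt]
          rw [ih low ((low + high) / 2 - 1) (by omega) hlo (by omega)]
          congr 1
          rw [List.take_take]
          congr 1; omega
        · simp only [if_neg hlt]
          rw [ih ((low + high) / 2 + 1) high (by omega) (by omega) hhi]
          have harg : ((xs.drop low.toNat).take (high + 1 - low).toNat).drop
                (((low + high) / 2 - low).toNat + 1)
              = (xs.drop ((low + high) / 2 + 1).toNat).take
                  (high + 1 - ((low + high) / 2 + 1)).toNat := by
            have e1 : (high + 1 - low).toNat - (((low + high) / 2 - low).toNat + 1)
                = (high + 1 - ((low + high) / 2 + 1)).toNat := by omega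
            have e2 : low.toNat + (((low + high) / 2 - low).toNat + 1)
                = ((low + high) / 2 + 1).toNat := by omega
            rw [List.drop_take, List.drop_drop, e1, e2]
          rw [harg]
          congr 1
          omega
    · rw [find_interval_index0_loop, find_interval_index0_go]
      have : (high + 1 - low).toNat = 0 := by omega
      simp [hlh, this]

-- ===== VERDICT (by name: the statement is the Claim_ definition above) =====
theorem find_interval_index0_spec : Claim_equal_find_interval_index0 := by
  intro t intervals _
  unfold Spec_find_interval_index0 find_interval_index0 find_interval_index0_alt
  rw [loop_eq_go t intervals (((intervals.length : Int) - 1) + 1 - 0).toNat 0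
        ((intervals.length : Int) - 1) (le_refl _) (le_refl _) (le_refl _)]
  simp
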